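-- pv_equiv track=rewrite | github.com/countsheeptosleep/tg_py | 3/main.py | correlated
-- ===== SOURCE A (Python) =====
-- INF = 9999999  # Бесконечность.
--
-- def correlated(am_old):
--     am = [[i for i in row] for row in am_old]
--     n = len(am[0])
--     for i in range(n):
--         for j in range(n):
--             if am[i][j] != 0 and am[i][j] != INF:
--                 am[j][i] = am[i][j]
--     return am
-- ===== SOURCE B (Python) =====
-- INF = 9999999  # Бесконечность.
--
-- def correlated(am_old):
--     n = len(am_old[0])
--
--     def cell(p, q):
--         v = am_old[p][q]
--         if p < n and q < n and p != q:
--             i, j = (p, q) if p < q else (q, p)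
--             a = am_old[i][j]
--             b = am_old[j][i]
--             if a != 0 and a != INF:
--                 return a
--             if b != 0 and b != INF:
--                 return b
--         return v
--
--     return [[cell(p, q) for q in range(len(am_old[p]))] for p in range(len(am_old))]
-- ===== Notes on version B (the rewrite author's own statement) =====
-- stated objective: alternative
-- what changed: B replaces A's in-place double loop with order-dependent mutation by a pure pointwise construction: each output cell is computed directly from the original matrix by the closed 'upper-triangle entry wins, else lower, else unchanged' rule, with no mutation at all.
import Mathlib
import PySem

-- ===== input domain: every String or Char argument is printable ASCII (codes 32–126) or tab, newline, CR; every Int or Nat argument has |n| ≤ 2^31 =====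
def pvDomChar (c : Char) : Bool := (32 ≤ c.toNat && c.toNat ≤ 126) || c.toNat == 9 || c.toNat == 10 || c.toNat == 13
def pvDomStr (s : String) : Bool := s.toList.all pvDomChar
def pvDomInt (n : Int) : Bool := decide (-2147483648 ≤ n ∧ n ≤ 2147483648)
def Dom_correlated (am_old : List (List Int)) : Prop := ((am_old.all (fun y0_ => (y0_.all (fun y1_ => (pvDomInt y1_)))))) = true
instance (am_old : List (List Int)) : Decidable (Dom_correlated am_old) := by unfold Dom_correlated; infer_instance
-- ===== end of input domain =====

-- B replaces A's in-place mutating double loop by a pure pointwise construction from the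
-- original matrix (alternative decomposition, same O(n^2) cost); the equivalence is about the
-- return value (A mutates only its own local copy, never the caller's argument).

-- matrix read am[p][q]; exact for in-range indices (Pre_ keeps every read of both programs in range)
def pvG (am : List (List Int)) (p q : Nat) : Int := (am.getD p []).getD q 0
-- matrix write am[p][q] = v; exact for in-range indices
def pvSet (am : List (List Int)) (p q : Nat) (v : Int) : List (List Int) :=
  am.set p ((am.getD p []).set q v)

-- ===== PORT A =====
-- body of A's inner loop: if am[i][j] != 0 and am[i][j] != INF: am[j][i] = am[i][j]
def pvStepA (am : List (List Int)) (i j : Nat) : List (List Int) :=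
  if pvG am i j ≠ 0 ∧ pvG am i j ≠ 9999999 then pvSet am j i (pvG am i j) else am

-- range(n) is ported as List.range n over natural indices (exact: n = len(am[0]) ≥ 0)
def correlated (am_old : List (List Int)) : List (List Int) :=
  let am := am_old.map (fun row => row.map (fun i => i))
  let n := (am.headD []).length
  (List.range n).foldl (fun am i => (List.range n).foldl (fun am j => pvStepA am i j) am) am

-- ===== PORT B =====
-- the helper 'cell(p, q)' of Source B
def pvCellB (am_old : List (List Int)) (n p q : Nat) : Int :=
  let v := pvG am_old p q
  if p < n ∧ q < n ∧ p ≠ q then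
    let i := if p < q then p else q
    let j := if p < q then q else p
    let a := pvG am_old i j
    let b := pvG am_old j i
    if a ≠ 0 ∧ a ≠ 9999999 then a
    else if b ≠ 0 ∧ b ≠ 9999999 then b
    else v
  else v

def correlated_alt (am_old : List (List Int)) : List (List Int) :=
  let n := (am_old.headD []).length
  (List.range am_old.length).map (fun p =>
    (List.range (am_old.getD p []).length).map (fun q => pvCellB am_old n p q))

-- ===== PRECONDITION & SPEC =====
-- exactly the inputs on which the Python A returns: am_old nonempty (else len(am[0]) raises
-- IndexError) and with n = len(am[0]), every index am[i][j] / am[j][i], i,j < n, in range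
-- (A raises IndexError otherwise)
def Pre_correlated (am_old : List (List Int)) : Prop :=
  am_old ≠ [] ∧ (am_old.headD []).length ≤ am_old.length ∧
    ∀ p, p < (am_old.headD []).length → (am_old.headD []).length ≤ (am_old.getD p []).length

instance (am_old : List (List Int)) : Decidable (Pre_correlated am_old) := by
  unfold Pre_correlated; infer_instance

def pvWitness_correlated : List (List Int) := [[0, 5], [7, 0]]

def Spec_correlated (am_old : List (List Int)) (out : List (List Int)) : Prop := out = correlated_alt am_old
instance (am_old : List (List Int)) (out : List (List Int)) : Decidable (Spec_correlated am_old out) := by unfold Spec_correlated; infer_instance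

-- ===== CLAIM (what is proved, stated in full; the proofs are below) =====
def Claim_equal_correlated : Prop := ∀ (am_old : List (List Int)), Dom_correlated am_old → Pre_correlated am_old → Spec_correlated am_old (correlated am_old)

-- ===== LEMMAS AND PROOFS =====

theorem getD_pvSet_row (am : List (List Int)) (p q : Nat) (v : Int) (r : Nat) :
    (pvSet am p q v).getD r [] =
      if r = p ∧ p < am.length then (am.getD p []).set q v else am.getD r [] := by
  unfold pvSet
  rw [List.getD_eq_getElem?_getD, List.getElem?_set, List.getD_eq_getElem?_getD]
  rcases eq_or_ne r p with hr | hr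
  · subst hr
    by_cases hrl : r < am.length <;> simp [hrl, List.getElem?_eq_none (a := am) (le_of_not_lt ·)]
  · simp [hr, Ne.symm hr]

theorem pvShape_pvSet (am t : List (List Int)) (p q : Nat) (v : Int)
    (h : am.length = t.length ∧ ∀ r : Nat, (am.getD r []).length = (t.getD r []).length) :
    (pvSet am p q v).length = t.length ∧
      ∀ r : Nat, ((pvSet am p q v).getD r []).length = (t.getD r []).length := by
  obtain ⟨h1, h2⟩ := h
  refine ⟨by simpa [pvSet] using h1, fun r => ?_⟩
  rw [getD_pvSet_row]
  split_ifs with hc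
  · rw [List.length_set, ← hc.1, h2]
  · exact h2 r

theorem pvG_pvSet (am : List (List Int)) (p q : Nat) (v : Int)
    (hp : p < am.length) (hq : q < (am.getD p []).length) (r s : Nat) :
    pvG (pvSet am p q v) r s = if r = p ∧ s = q then v else pvG am r s := by
  unfold pvG
  rw [getD_pvSet_row]
  rcases eq_or_ne r p with hr | hr
  · subst hr
    simp only [hp, and_true, if_true, true_and]
    rw [List.getD_eq_getElem?_getD (l := (am.getD r []).set q v),
        List.getElem?_set, List.getD_eq_getElem?_getD (l := am.getD r [])]
    rcases eq_or_ne s q with hs | hs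
    · subst hs; simp [- List.getD_eq_getElem?_getD, hq]
    · simp [hs, Ne.symm hs]
  · simp [hr]

-- closed form for the final value of cell (p,q) in terms of the original matrix t
def pvF (t : List (List Int)) (p q : Nat) : Int :=
  let a := pvG t (min p q) (max p q)
  let b := pvG t (max p q) (min p q)
  if a ≠ 0 ∧ a ≠ 9999999 then a else if b ≠ 0 ∧ b ≠ 9999999 then b else pvG t p q

-- A's intermediate state: cell (p,q) after rows < i are fully processed plus columns < m of row i
def pvSt (t : List (List Int)) (n i m p q : Nat) : Int :=
  if (q < i ∧ p < n) ∨ (q = i ∧ p < m) then pvF t p q else pvG t p q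

theorem pvF_diag (t : List (List Int)) (p : Nat) : pvF t p p = pvG t p p := by
  unfold pvF
  simp only [min_self, max_self]
  split_ifs <;> rfl

-- how the value A reads at step (i, m) relates to the final value of the written cell (m, i)
theorem pvF_step (t : List (List Int)) (m i : Nat) :
    ((if m < i then pvF t i m else pvG t i m) ≠ 0 ∧ (if m < i then pvF t i m else pvG t i m) ≠ 9999999 →
      pvF t m i = (if m < i then pvF t i m else pvG t i m)) ∧
    (¬((if m < i then pvF t i m else pvG t i m) ≠ 0 ∧ (if m < i then pvF t i m else pvG t i m) ≠ 9999999) →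
      pvF t m i = pvG t m i) := by
  rcases Nat.lt_trichotomy m i with hlt | heq | hgt
  · have hmin : min m i = m := by omega
    have hmax : max m i = i := by omega
    have hmin' : min i m = m := by omega
    have hmax' : max i m = i := by omega
    simp only [if_pos hlt]
    unfold pvF
    simp only [hmin, hmax, hmin', hmax']
    split_ifs <;> constructor <;> intro h <;> tauto
  · subst heq
    have hif : (if m < m then pvF t m m else pvG t m m) = pvG t m m := if_neg (lt_irrefl m)
    rw [hif, pvF_diag]
    exact ⟨fun _ => rfl, fun _ => rfl⟩
  · have hmin : min m i = i := by omega
    have hmax : max m i = m := by omega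
    simp only [if_neg (by omega : ¬ m < i)]
    unfold pvF
    simp only [hmin, hmax]
    split_ifs <;> constructor <;> intro h <;> tauto

theorem innerA_inv (t : List (List Int)) (n : Nat)
    (hn : n ≤ t.length) (hrow : ∀ p, p < n → n ≤ (t.getD p []).length)
    (i : Nat) (hi : i < n)
    (am : List (List Int))
    (hsh : am.length = t.length ∧ ∀ r : Nat, (am.getD r []).length = (t.getD r []).length)
    (hinv : ∀ p q, pvG am p q = pvSt t n i 0 p q) :
    ∀ m, m ≤ n →
      (((List.range m).foldl (fun am j => pvStepA am i j) am).length = t.length ∧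
        ∀ r : Nat, (((List.range m).foldl (fun am j => pvStepA am i j) am).getD r []).length = (t.getD r []).length) ∧
      ∀ p q, pvG ((List.range m).foldl (fun am j => pvStepA am i j) am) p q = pvSt t n i m p q := by
  intro m
  induction m with
  | zero =>
    intro _
    simp only [List.range_zero, List.foldl_nil]
    exact ⟨hsh, hinv⟩
  | succ m ih =>
    intro hm1
    have hm : m < n := by omega
    obtain ⟨ihsh, ihg⟩ := ih (by omega)
    set S := (List.range m).foldl (fun am j => pvStepA am i j) am with hS
    have hfold : (List.range (m + 1)).foldl (fun am j => pvStepA am i j) am = pvStepA S i m := by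
      rw [List.range_succ, List.foldl_append, List.foldl_cons, List.foldl_nil]
    rw [hfold]
    have hread : pvG S i m = if m < i then pvF t i m else pvG t i m := by
      rw [ihg i m]
      unfold pvSt
      rcases Nat.lt_trichotomy m i with h | h | h
      · rw [if_pos (Or.inl ⟨h, hi⟩), if_pos h]
      · rw [if_neg (by omega), if_neg (by omega)]
      · rw [if_neg (by omega), if_neg (by omega)]
    have hkey := pvF_step t m i
    have hml : m < S.length := ihsh.1 ▸ lt_of_lt_of_le hm hn
    have hil : i < (S.getD m []).length := by
      rw [ihsh.2 m]; exact lt_of_lt_of_le hi (hrow m hm)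
    have hst : ∀ p q, ¬(p = m ∧ q = i) → pvSt t n i (m + 1) p q = pvSt t n i m p q := by
      intro p q hpq
      unfold pvSt
      have hiff : ((q < i ∧ p < n) ∨ (q = i ∧ p < m + 1)) ↔ ((q < i ∧ p < n) ∨ (q = i ∧ p < m)) := by
        constructor
        · rintro (h | ⟨hq, hp⟩)
          · exact Or.inl h
          · have : p ≠ m := fun hpm => hpq ⟨hpm, hq⟩
            exact Or.inr ⟨hq, by omega⟩
        · rintro (h | ⟨hq, hp⟩)
          · exact Or.inl h
          · exact Or.inr ⟨hq, by omega⟩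
      rw [if_congr hiff rfl rfl]
    have hstm : pvSt t n i (m + 1) m i = pvF t m i := by
      unfold pvSt
      rw [if_pos (Or.inr ⟨rfl, by omega⟩)]
    unfold pvStepA
    by_cases hv : pvG S i m ≠ 0 ∧ pvG S i m ≠ 9999999
    · rw [if_pos hv]
      have hv' := hv
      rw [hread] at hv'
      refine ⟨pvShape_pvSet _ _ _ _ _ ihsh, fun p q => ?_⟩
      rw [pvG_pvSet _ _ _ _ hml hil]
      by_cases hpq : p = m ∧ q = i
      · obtain ⟨h1, h2⟩ := hpq
        subst h1; subst h2
        rw [if_pos ⟨rfl, rfl⟩, hstm, hread]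
        exact (hkey.1 hv').symm
      · rw [if_neg hpq, ihg, hst p q hpq]
    · rw [if_neg hv]
      have hv' := hv
      rw [hread] at hv'
      refine ⟨ihsh, fun p q => ?_⟩
      rw [ihg]
      by_cases hpq : p = m ∧ q = i
      · obtain ⟨h1, h2⟩ := hpq
        subst h1; subst h2
        rw [hstm, hkey.2 hv']
        unfold pvSt
        rw [if_neg]
        rintro (⟨h, _⟩ | ⟨_, h⟩) <;> omega
      · rw [hst p q hpq]

theorem outerA_inv (t : List (List Int)) (n : Nat)
    (hn : n ≤ t.length) (hrow : ∀ p, p < n → n ≤ (t.getD p []).length) :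
    ∀ k, k ≤ n →
      (((List.range k).foldl (fun am i => (List.range n).foldl (fun am j => pvStepA am i j) am) t).length = t.length ∧
        ∀ r : Nat, (((List.range k).foldl (fun am i => (List.range n).foldl (fun am j => pvStepA am i j) am) t).getD r []).length = (t.getD r []).length) ∧
      ∀ p q, pvG ((List.range k).foldl (fun am i => (List.range n).foldl (fun am j => pvStepA am i j) am) t) p q = pvSt t n k 0 p q := by
  intro k
  induction k with
  | zero =>
    intro _
    refine ⟨⟨by simp, by simp⟩, fun p q => ?_⟩
    simp only [List.range_zero, List.foldl_nil]
    unfold pvSt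
    rw [if_neg (by omega)]
  | succ k ih =>
    intro hk1
    have hk : k < n := by omega
    obtain ⟨ihsh, ihg⟩ := ih (by omega)
    set S := (List.range k).foldl (fun am i => (List.range n).foldl (fun am j => pvStepA am i j) am) t with hS
    have hfold : (List.range (k + 1)).foldl (fun am i => (List.range n).foldl (fun am j => pvStepA am i j) am) t
        = (List.range n).foldl (fun am j => pvStepA am k j) S := by
      rw [List.range_succ, List.foldl_append, List.foldl_cons, List.foldl_nil]
    rw [hfold]
    obtain ⟨hsh', hg'⟩ := innerA_inv t n hn hrow k hk S ihsh ihg n le_rfl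
    refine ⟨hsh', fun p q => ?_⟩
    rw [hg' p q]
    unfold pvSt
    have hiff : ((q < k ∧ p < n) ∨ (q = k ∧ p < n)) ↔ ((q < k + 1 ∧ p < n) ∨ (q = k + 1 ∧ p < 0)) := by
      omega
    rw [if_congr hiff rfl rfl]

theorem pvCellB_eq (t : List (List Int)) (n p q : Nat) :
    pvCellB t n p q = if p < n ∧ q < n then pvF t p q else pvG t p q := by
  unfold pvCellB pvF
  by_cases hn : p < n ∧ q < n
  · rcases Nat.lt_trichotomy p q with h | h | h
    · rw [if_pos ⟨hn.1, hn.2, by omega⟩, if_pos hn]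
      simp only [if_pos h, (by omega : min p q = p), (by omega : max p q = q)]
    · subst h
      rw [if_neg (by tauto), if_pos hn]
      simp only [min_self, max_self]
      split_ifs <;> rfl
    · rw [if_pos ⟨hn.1, hn.2, by omega⟩, if_pos hn]
      simp only [if_neg (by omega : ¬ p < q), (by omega : min p q = q), (by omega : max p q = p)]
  · rw [if_neg (by tauto), if_neg hn]

theorem final_eq (am_old : List (List Int))
    (h2 : (am_old.headD []).length ≤ am_old.length)
    (h3 : ∀ p, p < (am_old.headD []).length → (am_old.headD []).length ≤ (am_old.getD p []).length) :
    correlated am_old = correlated_alt am_old := by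
  set n := (am_old.headD []).length with hn
  have hmapid : am_old.map (fun row => row.map (fun i => i)) = am_old := by
    simp
  have hA : correlated am_old
      = (List.range n).foldl (fun am i => (List.range n).foldl (fun am j => pvStepA am i j) am) am_old := by
    unfold correlated
    rw [hmapid]
  obtain ⟨⟨hlen, hrl⟩, hg⟩ := outerA_inv am_old n h2 h3 n le_rfl
  rw [hA]
  set A := (List.range n).foldl (fun am i => (List.range n).foldl (fun am j => pvStepA am i j) am) am_old with hAS
  have hBlen : (correlated_alt am_old).length = am_old.length := by
    unfold correlated_alt
    simp
  apply List.ext_getElem (by rw [hlen, hBlen])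
  intro r h1r h2r
  have hrlen : r < am_old.length := by rwa [hlen] at h1r
  have hBrow : (correlated_alt am_old)[r] = (List.range (am_old.getD r []).length).map (fun q => pvCellB am_old n r q) := by
    unfold correlated_alt
    simp only [List.getElem_map, List.getElem_range]
    rw [← hn]
  have hArowlen : A[r].length = (am_old.getD r []).length := by
    have := hrl r
    rwa [List.getD_eq_getElem _ _ h1r] at this
  apply List.ext_getElem (by rw [hBrow]; simp [hArowlen])
  intro q hq1 hq2
  have hqlen : q < (am_old.getD r []).length := by rwa [hArowlen] at hq1
  have hAval : A[r][q] = pvG A r q := by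
    unfold pvG
    rw [List.getD_eq_getElem _ _ h1r, List.getD_eq_getElem _ _ (by rwa [hArowlen])]
  rw [hAval, hg r q, List.getElem_of_eq hBrow hq2]
  simp only [List.getElem_map, List.getElem_range]
  rw [pvCellB_eq]
  unfold pvSt
  have hiff : ((q < n ∧ r < n) ∨ (q = n ∧ r < 0)) ↔ (r < n ∧ q < n) := by omega
  rw [if_congr hiff rfl rfl]

-- ===== VERDICT (by name: the statement is the Claim_ definition above) =====
theorem correlated_spec : Claim_equal_correlated := by
  intro am_old _ hpre
  obtain ⟨_, h2, h3⟩ := hpre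
  exact final_eq am_old h2 h3
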